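-- pv_equiv track=rewrite | github.com/bcmin1018/codingtest | greedy/P_택배상하차_Lv2_kakao.py | solution
-- ===== SOURCE A (Python) =====
-- def solution(cap, n, deliveries, pickups):
--     answer = 0
--     r_deliveries = deliveries[::-1] # 리스트를 반대로
--     r_pickups = pickups[::-1]
--     d, p = 0, 0
--     for i in range(n): # 배달, 픽업해야할 수하물의 갯수를 카운트하여 계속 더한다.
--         d += r_deliveries[i]
--         p += r_pickups[i]
--         while d>0 or p>0: # d, p가 0보다 크면 배달 또는 픽업해야하는 수하물이 있으므로 cap에서 마이너스하고 하차장을 갖다온 거리를 구한다. d, p가 0보다 작으면 아직 배달과 픽업을 더 할 수 있는 상태이므로 하차장을 갖다오지 않는다.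
--             d -= cap
--             p -= cap
--             answer += (n-i) * 2
--     return answer
-- ===== SOURCE B (Python) =====
-- def solution(cap, n, deliveries, pickups):
--     answer = 0
--     d = p = 0
--     for i in range(n):
--         d += deliveries[-1 - i]
--         p += pickups[-1 - i]
--         k = max(0, -(-d // cap), -(-p // cap))
--         answer += 2 * k * (n - i)
--         d -= k * cap
--         p -= k * cap
--     return answer
-- ===== Notes on version B (the rewrite author's own statement) =====
-- stated objective: alternative
-- what changed: replaces the inner one-trip-at-a-time while-loop with a closed-form ceiling-division trip count k per position and drops the reversed list copies in favour of negative indexing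
-- outside the precondition, e.g. on solution(0, 1, [0], [0]): A returns 0, B raises ZeroDivisionError; on solution(-1, 1, [-1], [0]): A returns 0, B returns 2
import Mathlib
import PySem

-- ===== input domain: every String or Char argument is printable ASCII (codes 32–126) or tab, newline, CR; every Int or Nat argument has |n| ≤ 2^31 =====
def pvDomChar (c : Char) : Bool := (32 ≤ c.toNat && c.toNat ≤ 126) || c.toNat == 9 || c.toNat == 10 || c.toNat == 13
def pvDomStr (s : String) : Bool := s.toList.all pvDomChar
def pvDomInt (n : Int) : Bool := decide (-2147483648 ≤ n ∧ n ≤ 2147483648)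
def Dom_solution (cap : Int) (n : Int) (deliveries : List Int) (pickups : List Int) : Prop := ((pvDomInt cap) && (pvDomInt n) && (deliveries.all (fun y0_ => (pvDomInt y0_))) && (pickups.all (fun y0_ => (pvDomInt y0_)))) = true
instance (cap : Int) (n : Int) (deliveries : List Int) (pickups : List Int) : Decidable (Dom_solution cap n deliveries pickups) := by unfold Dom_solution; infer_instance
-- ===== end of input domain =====

-- B replaces A's inner while-loop by a closed-form ceiling-division trip count and drops the
-- reversed copies in favour of negative indexing (alternative algorithm, same return value).


-- ===== PORT A =====
-- A's inner 'while d>0 or p>0' loop; the 'cap ≤ 0' branch is only a totality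
-- guard (under Pre_ cap > 0; on cap ≤ 0 the Python loop diverges, nothing is claimed there).
def solLoopA (cap step d p acc : Int) : Int × Int × Int :=
  if 0 < d ∨ 0 < p then
    if h : 0 < cap then
      solLoopA cap step (d - cap) (p - cap) (acc + step * 2)
    else (d, p, acc)
  else (d, p, acc)
termination_by d.toNat + p.toNat
decreasing_by omega

def solution (cap : Int) (n : Int) (deliveries : List Int) (pickups : List Int) : Int :=
  let r_deliveries := (PySem.List.slice? deliveries none none (-1)).getD []
  let r_pickups := (PySem.List.slice? pickups none none (-1)).getD []
  (((PySem.List.pyRange 0 n 1).foldl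
      (fun (st : Int × Int × Int) i =>
        solLoopA cap (n - i)
          (st.1 + (PySem.List.pyGet? r_deliveries i).getD 0)
          (st.2.1 + (PySem.List.pyGet? r_pickups i).getD 0)
          st.2.2)
      (0, 0, 0))).2.2

-- ===== PORT B =====
-- ceilDiv a c = -(-a // c), Python's ceiling division idiom from Source B
def ceilDiv (a c : Int) : Int := -(PySem.Int.floordiv (-a) c)

def solution_alt (cap : Int) (n : Int) (deliveries : List Int) (pickups : List Int) : Int :=
  (((PySem.List.pyRange 0 n 1).foldl
      (fun (st : Int × Int × Int) i =>
        let d := st.1 + (PySem.List.pyGet? deliveries (-1 - i)).getD 0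
        let p := st.2.1 + (PySem.List.pyGet? pickups (-1 - i)).getD 0
        let k := max 0 (max (ceilDiv d cap) (ceilDiv p cap))
        (d - k * cap, p - k * cap, st.2.2 + 2 * k * (n - i)))
      (0, 0, 0))).2.2

-- ===== PRECONDITION & SPEC =====
-- Pre_ excludes cap ≤ 0 with a non-empty loop (0 < n), on which A diverges whenever some suffix
-- sum becomes positive and only accidentally returns 0 otherwise (B's ceiling division raises or
-- differs there), and n > length of either list, on which A raises IndexError.
def Pre_solution (cap : Int) (n : Int) (deliveries : List Int) (pickups : List Int) : Prop :=
  (0 < cap ∨ n ≤ 0) ∧ n ≤ (deliveries.length : Int) ∧ n ≤ (pickups.length : Int)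
instance (cap : Int) (n : Int) (deliveries : List Int) (pickups : List Int) : Decidable (Pre_solution cap n deliveries pickups) := by unfold Pre_solution; infer_instance

def pvWitness_solution : Int × Int × List Int × List Int := (4, 2, [1, 0], [0, 2])

def Spec_solution (cap : Int) (n : Int) (deliveries : List Int) (pickups : List Int) (out : Int) : Prop := out = solution_alt cap n deliveries pickups
instance (cap : Int) (n : Int) (deliveries : List Int) (pickups : List Int) (out : Int) : Decidable (Spec_solution cap n deliveries pickups out) := by unfold Spec_solution; infer_instance

-- ===== CLAIM (what is proved, stated in full; the proofs are below) =====
def Claim_equal_solution : Prop := ∀ (cap : Int) (n : Int) (deliveries : List Int) (pickups : List Int), Dom_solution cap n deliveries pickups → Pre_solution cap n deliveries pickups → Spec_solution cap n deliveries pickups (solution cap n deliveries pickups)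

-- ===== LEMMAS AND PROOFS =====

lemma ceilDiv_nonpos (a c : Int) (hc : 0 < c) (ha : a ≤ 0) : ceilDiv a c ≤ 0 := by
  unfold ceilDiv
  have h := (PySem.Int.le_floordiv_iff_mul_le (a := -a) (b := c) (q := 0) hc).mpr (by omega)
  omega

lemma ceilDiv_pos (a c : Int) (hc : 0 < c) (ha : 0 < a) : 1 ≤ ceilDiv a c := by
  unfold ceilDiv
  have h := (PySem.Int.floordiv_lt_iff_lt_mul (a := -a) (b := c) (q := 0) hc).mpr (by omega)
  omega

lemma ceilDiv_sub (a c : Int) (hc : 0 < c) : ceilDiv (a - c) c = ceilDiv a c - 1 := by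
  unfold ceilDiv
  rw [PySem.Int.floordiv_eq_ediv_of_pos hc, PySem.Int.floordiv_eq_ediv_of_pos hc]
  have : -(a - c) = -a + 1 * c := by ring
  rw [this, Int.add_mul_ediv_right _ _ (by omega : c ≠ 0)]
  ring

lemma solLoopA_eq (cap step : Int) (hc : 0 < cap) :
    ∀ (m : Nat) (d p acc : Int), d.toNat + p.toNat ≤ m →
      solLoopA cap step d p acc =
        (d - max 0 (max (ceilDiv d cap) (ceilDiv p cap)) * cap,
         p - max 0 (max (ceilDiv d cap) (ceilDiv p cap)) * cap,
         acc + max 0 (max (ceilDiv d cap) (ceilDiv p cap)) * (step * 2)) := by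
  intro m
  induction m with
  | zero =>
    intro d p acc hb
    rw [solLoopA]
    have hd : d ≤ 0 := by omega
    have hp : p ≤ 0 := by omega
    have h1 := ceilDiv_nonpos d cap hc hd
    have h2 := ceilDiv_nonpos p cap hc hp
    have hk : max 0 (max (ceilDiv d cap) (ceilDiv p cap)) = 0 := by omega
    rw [hk, if_neg (by omega : ¬ (0 < d ∨ 0 < p))]
    refine Prod.ext (by ring) (Prod.ext (by ring) (by ring))
  | succ m ih =>
    intro d p acc hb
    rw [solLoopA]
    by_cases hpos : 0 < d ∨ 0 < p
    · rw [if_pos hpos, dif_pos hc]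
      rw [ih (d - cap) (p - cap) (acc + step * 2) (by omega)]
      rw [ceilDiv_sub d cap hc, ceilDiv_sub p cap hc]
      have hk1 : 1 ≤ max 0 (max (ceilDiv d cap) (ceilDiv p cap)) := by
        rcases hpos with h | h
        · have := ceilDiv_pos d cap hc h; omega
        · have := ceilDiv_pos p cap hc h; omega
      have hk : max 0 (max (ceilDiv d cap - 1) (ceilDiv p cap - 1)) =
          max 0 (max (ceilDiv d cap) (ceilDiv p cap)) - 1 := by omega
      rw [hk]
      refine Prod.ext (by ring) (Prod.ext (by ring) (by ring))
    · rw [if_neg hpos]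
      have hd : d ≤ 0 := by omega
      have hp : p ≤ 0 := by omega
      have h1 := ceilDiv_nonpos d cap hc hd
      have h2 := ceilDiv_nonpos p cap hc hp
      have hk : max 0 (max (ceilDiv d cap) (ceilDiv p cap)) = 0 := by omega
      rw [hk]
      refine Prod.ext (by ring) (Prod.ext (by ring) (by ring))

-- reversed-list indexing equals negative indexing of the original list
lemma pyGet?_reverse_eq_neg (xs : List Int) (i : Int) (h0 : 0 ≤ i) (h1 : i < (xs.length : Int)) :
    PySem.List.pyGet? xs.reverse i = PySem.List.pyGet? xs (-1 - i) := by
  simp only [PySem.List.pyGet?, PySem.List.pyIdx?, List.length_reverse]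
  rw [if_pos h0, if_pos h1, if_neg (by omega : ¬ (0:Int) ≤ -1 - i),
      if_pos (by omega : -(xs.length : Int) ≤ -1 - i)]
  simp only [Option.bind_some]
  rw [List.getElem?_reverse (by omega : i.toNat < xs.length)]
  congr 1
  omega

lemma step_eq (cap n : Int) (dels pics : List Int) (hc : 0 < cap)
    (hd : n ≤ (dels.length : Int)) (hp : n ≤ (pics.length : Int)) :
    ∀ (st : Int × Int × Int) (i : Int), i ∈ PySem.List.pyRange 0 n 1 →
      solLoopA cap (n - i)
        (st.1 + (PySem.List.pyGet? dels.reverse i).getD 0)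
        (st.2.1 + (PySem.List.pyGet? pics.reverse i).getD 0)
        st.2.2 =
      (let d := st.1 + (PySem.List.pyGet? dels (-1 - i)).getD 0
       let p := st.2.1 + (PySem.List.pyGet? pics (-1 - i)).getD 0
       let k := max 0 (max (ceilDiv d cap) (ceilDiv p cap))
       (d - k * cap, p - k * cap, st.2.2 + 2 * k * (n - i))) := by
  intro st i hi
  rw [PySem.List.mem_pyRange_one] at hi
  rw [pyGet?_reverse_eq_neg dels i hi.1 (by omega),
      pyGet?_reverse_eq_neg pics i hi.1 (by omega)]
  rw [solLoopA_eq cap (n - i) hc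
        ((st.1 + (PySem.List.pyGet? dels (-1 - i)).getD 0).toNat +
          (st.2.1 + (PySem.List.pyGet? pics (-1 - i)).getD 0).toNat) _ _ _ (le_refl _)]
  refine Prod.ext rfl (Prod.ext rfl (by ring))

-- ===== VERDICT (by name: the statement is the Claim_ definition above) =====
theorem solution_spec : Claim_equal_solution := by
  intro cap n dels pics _hdom hpre
  obtain ⟨hcap, hd, hp⟩ := hpre
  unfold Spec_solution solution solution_alt
  rw [PySem.List.slice?_none_none_neg_one, PySem.List.slice?_none_none_neg_one]
  simp only [Option.getD_some]
  rcases hcap with hc | hn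
  · exact congrArg (fun t : Int × Int × Int => t.2.2)
      (PySem.List.foldl_congr_mem _ _ _ _ (fun st i hi => step_eq cap n dels pics hc hd hp st i hi))
  · rw [PySem.List.pyRange_one_eq_nil hn]
    rfl
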